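-- pv_equiv track=rewrite | github.com/grammarly/gector | gector/tokenization.py | get_bpe_groups
-- ===== SOURCE A (Python) =====
-- def get_bpe_groups(token_offsets, bpe_offsets, input_ids, max_bpe_pieces=5):
--     bpe_groups = []
--     last_used_bpe = 0
--     # find the size of offsets
--     if (0, 0) in bpe_offsets:
--         bpe_size = bpe_offsets.index((0, 0))
--     else:
--         bpe_size = len(bpe_offsets)
--
--     saved_ids = [i for i in range(len(input_ids))]
--     redundant_ids = []
--     for token_offset in token_offsets:
--         start_token, end_token = token_offset
--         bpe_group = []
--         mapping_is_found = False
--         for i in range(last_used_bpe, bpe_size):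
--             start_bpe, end_bpe = bpe_offsets[i]
--             if start_bpe >= start_token and end_bpe <= end_token:
--                 # check if bpe_group is satisfy max_bpe_pieces constraint
--                 if len(bpe_group) < max_bpe_pieces:
--                     bpe_group.append(i)
--                 else:
--                     redundant_ids.append(i)
--                 last_used_bpe = i + 1
--                 mapping_is_found = True
--             elif mapping_is_found:
--                 # stop doing useless iterations
--                 break
--             else:
--                 continue
--         bpe_groups.append(bpe_group)
--     saved_ids = [i for i in saved_ids if i not in redundant_ids]
--     return bpe_groups, saved_ids
-- ===== SOURCE B (Python) =====
-- def _drop_while(pred, xs):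
--     # suffix of xs from the first element failing pred (itertools.dropwhile, materialised)
--     for n, x in enumerate(xs):
--         if not pred(x):
--             return xs[n:]
--     return []
--
--
-- def _take_while(pred, xs):
--     # longest prefix of xs whose elements all satisfy pred (itertools.takewhile)
--     out = []
--     for x in xs:
--         if not pred(x):
--             break
--         out.append(x)
--     return out
--
--
-- def get_bpe_groups(token_offsets, bpe_offsets, input_ids, max_bpe_pieces=5):
--     # find the size of offsets
--     if (0, 0) in bpe_offsets:
--         size = bpe_offsets.index((0, 0))
--     else:
--         size = len(bpe_offsets)
--     # phase 1: uncapped maximal runs, via span (drop-while / take-while) over a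
--     # shrinking suffix of the enumerated live pieces; no cap logic here at all
--     rest = list(enumerate(bpe_offsets[:size]))
--     full_runs = []
--     for start_token, end_token in token_offsets:
--         ok = lambda p: start_token <= p[1][0] and p[1][1] <= end_token
--         tail = _drop_while(lambda p: not ok(p), rest)
--         run = _take_while(ok, tail)
--         full_runs.append([i for i, _ in run])
--         if run:
--             rest = tail[len(run):]
--     # phase 2: cap each run by slicing; the overflow tails form the redundant set
--     cut = max(max_bpe_pieces, 0)
--     groups = [run[:cut] for run in full_runs]
--     redundant = {i for run in full_runs for i in run[cut:]}
--     saved = [i for i in range(len(input_ids)) if i not in redundant]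
--     return groups, saved
-- ===== Notes on version B (the rewrite author's own statement) =====
-- stated objective: alternative
-- what changed: Replaces A's single interleaved flag-driven scan (per-index match/break/continue with in-loop cap checks and a cursor integer) by two staged passes: phase 1 computes the uncapped maximal runs with span combinators (drop-while/take-while) over a shrinking suffix of the enumerated live pieces, with no cap logic at all; phase 2 caps each run by slicing, collects the overflow tails into a set, and filters the saved ids against it.
import Mathlib
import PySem

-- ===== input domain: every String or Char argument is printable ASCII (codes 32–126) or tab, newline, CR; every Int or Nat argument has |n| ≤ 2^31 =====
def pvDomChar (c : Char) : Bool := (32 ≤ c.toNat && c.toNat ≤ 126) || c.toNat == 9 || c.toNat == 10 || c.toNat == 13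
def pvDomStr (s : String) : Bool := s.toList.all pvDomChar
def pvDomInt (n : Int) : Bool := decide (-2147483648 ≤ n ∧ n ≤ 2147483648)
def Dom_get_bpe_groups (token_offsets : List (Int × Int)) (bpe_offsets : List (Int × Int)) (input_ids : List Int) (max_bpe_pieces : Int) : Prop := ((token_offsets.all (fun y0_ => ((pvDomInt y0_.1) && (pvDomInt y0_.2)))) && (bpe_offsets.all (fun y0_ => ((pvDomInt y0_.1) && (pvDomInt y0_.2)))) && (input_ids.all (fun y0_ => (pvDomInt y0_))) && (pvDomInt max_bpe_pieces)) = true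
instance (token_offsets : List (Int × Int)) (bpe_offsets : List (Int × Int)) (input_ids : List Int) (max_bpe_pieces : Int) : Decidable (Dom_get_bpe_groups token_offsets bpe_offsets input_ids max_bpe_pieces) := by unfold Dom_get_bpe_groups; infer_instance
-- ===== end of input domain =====

-- B replaces A's interleaved flag-driven scan by two staged passes: span
-- (drop-while/take-while) over a shrinking suffix of the enumerated live pieces
-- computing the uncapped runs, then a separate capping/overflow-set pass;
-- return-value equivalence is proved for all inputs (A is total).

-- ===== PORT A =====
-- inner 'for i in range(last_used_bpe, bpe_size)' loop; state (bpe_group, redundant_ids, last_used_bpe, mapping_is_found)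
def pvInnerA (bpe : List (Int × Int)) (st et mx : Int) :
    List Int → List Int × List Int × Int × Bool → List Int × List Int × Int × Bool
  | [], s => s
  | i :: rest, (grp, red, last, found) =>
    let q := PySem.List.pyGetD bpe i (0, 0)   -- bpe_offsets[i]; i is always a valid index here
    if q.1 ≥ st ∧ q.2 ≤ et then
      if (grp.length : Int) < mx then
        pvInnerA bpe st et mx rest (grp ++ [i], red, i + 1, true)
      else
        pvInnerA bpe st et mx rest (grp, red ++ [i], i + 1, true)
    else if found then (grp, red, last, found)   -- break
    else pvInnerA bpe st et mx rest (grp, red, last, found)   -- continue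

-- outer 'for token_offset in token_offsets' loop; state (bpe_groups, redundant_ids, last_used_bpe)
def pvOuterA (bpe : List (Int × Int)) (mx size : Int) :
    List (Int × Int) → List (List Int) × List Int × Int → List (List Int) × List Int × Int
  | [], s => s
  | (st, et) :: toks, (gs, red, last) =>
    let r := pvInnerA bpe st et mx (PySem.List.pyRange last size 1) ([], red, last, false)
    pvOuterA bpe mx size toks (gs ++ [r.1], r.2.1, r.2.2.1)

def get_bpe_groups (token_offsets : List (Int × Int)) (bpe_offsets : List (Int × Int)) (input_ids : List Int) (max_bpe_pieces : Int) : List (List Int) × List Int :=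
  let bpe_size : Int := match PySem.List.index? bpe_offsets (0, 0) with
    | some k => (k : Int)
    | none => (bpe_offsets.length : Int)
  let r := pvOuterA bpe_offsets max_bpe_pieces bpe_size token_offsets ([], [], 0)
  -- saved_ids = [i for i in range(len(input_ids))], then filtered by 'i not in redundant_ids'
  (r.1, (PySem.List.pyRange 0 (input_ids.length : Int) 1).filter (fun i => !(r.2.1.contains i)))

-- ===== PORT B =====
-- 'ok = lambda p: start_token <= p[1][0] and p[1][1] <= end_token'
def pvOkB (st et : Int) (p : Int × (Int × Int)) : Bool := decide (st ≤ p.2.1 ∧ p.2.2 ≤ et)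

-- phase 1: 'for start_token, end_token in token_offsets: tail = _drop_while(...); run = _take_while(...); ...'
def pvRunsB : List (Int × Int) → List (Int × (Int × Int)) → List (List Int)
  | [], _ => []
  | (st, et) :: toks, rest =>
    let tail := rest.dropWhile (fun p => !(pvOkB st et p))   -- _drop_while(lambda p: not ok(p), rest)
    let run := tail.takeWhile (pvOkB st et)                  -- _take_while(ok, tail)
    let rest' := if run = [] then rest else tail.drop run.length   -- rest = tail[len(run):] if run
    run.map (fun p => p.1) :: pvRunsB toks rest'

def get_bpe_groups_alt (token_offsets : List (Int × Int)) (bpe_offsets : List (Int × Int)) (input_ids : List Int) (max_bpe_pieces : Int) : List (List Int) × List Int :=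
  let size : Nat := match PySem.List.index? bpe_offsets (0, 0) with
    | some k => k
    | none => bpe_offsets.length
  -- rest = list(enumerate(bpe_offsets[:size]))
  let full := pvRunsB token_offsets (PySem.List.enumerate (PySem.List.slice bpe_offsets none (some (size : Int))) 0)
  -- phase 2
  let cut : Nat := (max max_bpe_pieces 0).toNat
  let red := PySem.Set.ofList (full.flatMap (fun r => r.drop cut))   -- {i for run in full_runs for i in run[cut:]}
  (full.map (fun r => r.take cut),
   (PySem.List.pyRange 0 (input_ids.length : Int) 1).filter (fun i => !(PySem.Set.contains red i)))

-- ===== PRECONDITION & SPEC =====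
def Spec_get_bpe_groups (token_offsets : List (Int × Int)) (bpe_offsets : List (Int × Int)) (input_ids : List Int) (max_bpe_pieces : Int) (out : List (List Int) × List Int) : Prop := out = get_bpe_groups_alt token_offsets bpe_offsets input_ids max_bpe_pieces
instance (token_offsets : List (Int × Int)) (bpe_offsets : List (Int × Int)) (input_ids : List Int) (max_bpe_pieces : Int) (out : List (List Int) × List Int) : Decidable (Spec_get_bpe_groups token_offsets bpe_offsets input_ids max_bpe_pieces out) := by unfold Spec_get_bpe_groups; infer_instance

-- ===== CLAIM (what is proved, stated in full; the proofs are below) =====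
def Claim_equal_get_bpe_groups : Prop := ∀ (token_offsets : List (Int × Int)) (bpe_offsets : List (Int × Int)) (input_ids : List Int) (max_bpe_pieces : Int), Dom_get_bpe_groups token_offsets bpe_offsets input_ids max_bpe_pieces → Spec_get_bpe_groups token_offsets bpe_offsets input_ids max_bpe_pieces (get_bpe_groups token_offsets bpe_offsets input_ids max_bpe_pieces)

-- ===== LEMMAS AND PROOFS =====

-- proof-only characterisation of A's inner scan: first matching index at/after j …
def pvFindB (bpe : List (Int × Int)) (st et : Int) (size j : Nat) : Nat :=
  if h : j < size then
    if (bpe.getD j (0, 0)).1 ≥ st ∧ (bpe.getD j (0, 0)).2 ≤ et then j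
    else pvFindB bpe st et size (j + 1)
  else j
termination_by size - j
decreasing_by omega

-- … and end of the consecutive run of matches from k
def pvEndB (bpe : List (Int × Int)) (st et : Int) (size k : Nat) : Nat :=
  if h : k < size then
    if (bpe.getD k (0, 0)).1 ≥ st ∧ (bpe.getD k (0, 0)).2 ≤ et then pvEndB bpe st et size (k + 1)
    else k
  else k
termination_by size - k
decreasing_by omega

lemma pvFindB_unfold (bpe : List (Int × Int)) (st et : Int) (size j : Nat) :
    pvFindB bpe st et size j =
      if j < size then
        if (bpe.getD j (0, 0)).1 ≥ st ∧ (bpe.getD j (0, 0)).2 ≤ et then j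
        else pvFindB bpe st et size (j + 1)
      else j := by
  rw [pvFindB]
  simp only [dite_eq_ite]

lemma pvEndB_unfold (bpe : List (Int × Int)) (st et : Int) (size k : Nat) :
    pvEndB bpe st et size k =
      if k < size then
        if (bpe.getD k (0, 0)).1 ≥ st ∧ (bpe.getD k (0, 0)).2 ≤ et then pvEndB bpe st et size (k + 1)
        else k
      else k := by
  rw [pvEndB]
  simp only [dite_eq_ite]

lemma pvFindB_le (bpe : List (Int × Int)) (st et : Int) (size : Nat) :
    ∀ j, j ≤ size → pvFindB bpe st et size j ≤ size := by
  intro j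
  induction hn : size - j generalizing j with
  | zero =>
    intro hj
    rw [pvFindB_unfold]
    split
    · omega
    · omega
  | succ n ih =>
    intro hj
    rw [pvFindB_unfold]
    split
    · split
      · omega
      · exact ih (j + 1) (by omega) (by omega)
    · omega

lemma pvFindB_spec (bpe : List (Int × Int)) (st et : Int) (size : Nat) :
    ∀ j, pvFindB bpe st et size j < size →
      ((bpe.getD (pvFindB bpe st et size j) (0, 0)).1 ≥ st ∧
       (bpe.getD (pvFindB bpe st et size j) (0, 0)).2 ≤ et) := by
  intro j
  induction hn : size - j generalizing j with
  | zero =>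
    rw [pvFindB_unfold]
    split
    · omega
    · omega
  | succ n ih =>
    by_cases h : j < size
    · by_cases hm : ((bpe.getD j (0, 0)).1 ≥ st ∧ (bpe.getD j (0, 0)).2 ≤ et)
      · have heq : pvFindB bpe st et size j = j := by
          rw [pvFindB_unfold, if_pos h, if_pos hm]
        rw [heq]; intro _; exact hm
      · have heq : pvFindB bpe st et size j = pvFindB bpe st et size (j + 1) := by
          rw [pvFindB_unfold, if_pos h, if_neg hm]
        rw [heq]; exact ih (j + 1) (by omega)
    · have heq : pvFindB bpe st et size j = j := by
        rw [pvFindB_unfold, if_neg h]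
      rw [heq]; omega

lemma pvEndB_ge (bpe : List (Int × Int)) (st et : Int) (size : Nat) :
    ∀ k, k ≤ pvEndB bpe st et size k := by
  intro k
  induction hn : size - k generalizing k with
  | zero =>
    rw [pvEndB_unfold]
    split
    · split
      · omega
      · omega
    · omega
  | succ n ih =>
    rw [pvEndB_unfold]
    split
    · split
      · exact le_trans (by omega) (ih (k + 1) (by omega))
      · omega
    · omega

lemma pvEndB_le (bpe : List (Int × Int)) (st et : Int) (size : Nat) :
    ∀ k, k ≤ size → pvEndB bpe st et size k ≤ size := by
  intro k
  induction hn : size - k generalizing k with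
  | zero =>
    intro hk
    rw [pvEndB_unfold]
    split
    · split
      · omega
      · omega
    · omega
  | succ n ih =>
    intro hk
    rw [pvEndB_unfold]
    split
    · split
      · exact ih (k + 1) (by omega) (by omega)
      · omega
    · omega

-- skip phase: while no bpe matches, A's inner loop leaves the state untouched
lemma innerA_skip (bpe : List (Int × Int)) (st et mx : Int) (size : Nat)
    (red : List Int) (l : Int) :
    ∀ p : Nat, p ≤ size →
      pvInnerA bpe st et mx (PySem.List.pyRange (p : Int) (size : Int) 1) ([], red, l, false)
        = pvInnerA bpe st et mx
            (PySem.List.pyRange ((pvFindB bpe st et size p : Nat) : Int) (size : Int) 1)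
            ([], red, l, false) := by
  intro p
  induction hn : size - p generalizing p with
  | zero =>
    intro hp
    have heq : pvFindB bpe st et size p = p := by
      rw [pvFindB_unfold, if_neg (by omega : ¬ p < size)]
    rw [heq]
  | succ n ih =>
    intro hp
    have hlt : p < size := by omega
    by_cases hm : ((bpe.getD p (0, 0)).1 ≥ st ∧ (bpe.getD p (0, 0)).2 ≤ et)
    · have heq : pvFindB bpe st et size p = p := by
        rw [pvFindB_unfold, if_pos hlt, if_pos hm]
      rw [heq]
    · have heq : pvFindB bpe st et size p = pvFindB bpe st et size (p + 1) := by
        rw [pvFindB_unfold, if_pos hlt, if_neg hm]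
      rw [heq]
      rw [PySem.List.pyRange_one_cons (by exact_mod_cast hlt)]
      have hget : PySem.List.pyGetD bpe (p : Int) (0, 0) = bpe.getD p (0, 0) :=
        PySem.List.pyGetD_natCast bpe p (0, 0)
      have hc : ((p : Int) + 1) = ((p + 1 : Nat) : Int) := by push_cast; ring
      simp only [pvInnerA, hget, if_neg hm, if_neg (Bool.false_ne_true), hc]
      exact ih (p + 1) (by omega) (by omega)

-- run phase: from a matching position (or with the break flag set), A's inner loop
-- consumes exactly the consecutive run of matches up to pvEndB
lemma innerA_run (bpe : List (Int × Int)) (st et mx : Int) (size : Nat) :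
    ∀ n (j : Nat) (grp red : List Int) (l : Int) (f : Bool), size - j = n → j ≤ size →
      (f = true ∨ (j < size ∧ (bpe.getD j (0, 0)).1 ≥ st ∧ (bpe.getD j (0, 0)).2 ≤ et)) →
      pvInnerA bpe st et mx (PySem.List.pyRange (j : Int) (size : Int) 1) (grp, red, l, f)
        = (grp ++ (((List.range' j (pvEndB bpe st et size j - j)).map (fun n => (n : Int))).take (mx - grp.length).toNat),
           red ++ (((List.range' j (pvEndB bpe st et size j - j)).map (fun n => (n : Int))).drop (mx - grp.length).toNat),
           if j < pvEndB bpe st et size j then ((pvEndB bpe st et size j : Nat) : Int) else l,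
           f || decide (j < pvEndB bpe st et size j)) := by
  intro n
  induction n with
  | zero =>
    intro j grp red l f hn hj hf
    have hje : j = size := by omega
    have hkeq : pvEndB bpe st et size j = j := by
      rw [pvEndB_unfold, if_neg (by omega : ¬ j < size)]
    have hnil : PySem.List.pyRange (j : Int) (size : Int) 1 = [] :=
      PySem.List.pyRange_one_eq_nil (by exact_mod_cast (by omega : size ≤ j))
    rw [hnil, hkeq]
    simp [pvInnerA]
  | succ n ih =>
    intro j grp red l f hn hj hf
    have hlt : j < size := by omega
    rw [PySem.List.pyRange_one_cons (by exact_mod_cast hlt)]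
    have hget : PySem.List.pyGetD bpe (j : Int) (0, 0) = bpe.getD j (0, 0) :=
      PySem.List.pyGetD_natCast bpe j (0, 0)
    by_cases hm : ((bpe.getD j (0, 0)).1 ≥ st ∧ (bpe.getD j (0, 0)).2 ≤ et)
    · -- a match: consume it and recurse
      have hend : pvEndB bpe st et size j = pvEndB bpe st et size (j + 1) := by
        rw [pvEndB_unfold, if_pos hlt, if_pos hm]
      have hkge : j + 1 ≤ pvEndB bpe st et size (j + 1) := pvEndB_ge bpe st et size (j + 1)
      have hc : ((j : Int) + 1) = ((j + 1 : Nat) : Int) := by push_cast; ring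
      have hrun : List.range' j (pvEndB bpe st et size j - j)
          = j :: List.range' (j + 1) (pvEndB bpe st et size (j + 1) - (j + 1)) := by
        rw [hend]
        have h2 : pvEndB bpe st et size (j + 1) - j
            = (pvEndB bpe st et size (j + 1) - (j + 1)) + 1 := by omega
        rw [h2, List.range'_succ]
      by_cases hg : (grp.length : Int) < mx
      · simp only [pvInnerA, hget, if_pos hm, if_pos hg, hc]
        rw [ih (j + 1) (grp ++ [(j : Int)]) red (((j + 1 : Nat) : Int)) true (by omega) (by omega) (Or.inl rfl)]
        rw [hrun]
        have ht : (mx - grp.length).toNat = (mx - (grp ++ [(j : Int)]).length).toNat + 1 := by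
          simp only [List.length_append, List.length_singleton]
          push_cast
          omega
        refine Prod.ext ?_ (Prod.ext ?_ (Prod.ext ?_ ?_))
        · rw [ht]; simp [List.take_succ_cons]
        · rw [ht]; simp [List.drop_succ_cons]
        · show _ = if j < pvEndB bpe st et size j then ((pvEndB bpe st et size j : Nat) : Int) else l
          rw [hend]
          by_cases hjk : j + 1 < pvEndB bpe st et size (j + 1)
          · rw [if_pos hjk, if_pos (by omega)]
          · have h3 : pvEndB bpe st et size (j + 1) = j + 1 := by omega
            rw [if_neg hjk, if_pos (by omega), h3]
        · show _ = (f || decide (j < pvEndB bpe st et size j))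
          rw [hend]
          simp
          omega
      · simp only [pvInnerA, hget, if_pos hm, if_neg hg, hc]
        rw [ih (j + 1) grp (red ++ [(j : Int)]) (((j + 1 : Nat) : Int)) true (by omega) (by omega) (Or.inl rfl)]
        rw [hrun]
        have ht0 : (mx - grp.length).toNat = 0 := by omega
        refine Prod.ext ?_ (Prod.ext ?_ (Prod.ext ?_ ?_))
        · simp [ht0]
        · simp [ht0]
        · show _ = if j < pvEndB bpe st et size j then ((pvEndB bpe st et size j : Nat) : Int) else l
          rw [hend]
          by_cases hjk : j + 1 < pvEndB bpe st et size (j + 1)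
          · rw [if_pos hjk, if_pos (by omega)]
          · have h3 : pvEndB bpe st et size (j + 1) = j + 1 := by omega
            rw [if_neg hjk, if_pos (by omega), h3]
        · show _ = (f || decide (j < pvEndB bpe st et size j))
          rw [hend]
          simp
          omega
    · -- no match: the flag must be set, so this is the break
      have hftrue : f = true := by
        rcases hf with h | h
        · exact h
        · exact absurd ⟨h.2.1, h.2.2⟩ hm
      subst hftrue
      have hkeq : pvEndB bpe st et size j = j := by
        rw [pvEndB_unfold, if_pos hlt, if_neg hm]
      simp only [pvInnerA, hget]
      rw [if_neg hm]
      simp [hkeq]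

-- one whole token step of A's inner loop, phrased with pvFindB/pvEndB
lemma innerA_token (bpe : List (Int × Int)) (st et mx : Int) (size : Nat)
    (red : List Int) (p : Nat) (hp : p ≤ size) :
    pvInnerA bpe st et mx (PySem.List.pyRange (p : Int) (size : Int) 1) ([], red, (p : Int), false)
      = (((List.range' (pvFindB bpe st et size p) (pvEndB bpe st et size (pvFindB bpe st et size p) - pvFindB bpe st et size p)).map (fun n => (n : Int))).take mx.toNat,
         red ++ (((List.range' (pvFindB bpe st et size p) (pvEndB bpe st et size (pvFindB bpe st et size p) - pvFindB bpe st et size p)).map (fun n => (n : Int))).drop mx.toNat),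
         if pvFindB bpe st et size p < pvEndB bpe st et size (pvFindB bpe st et size p)
           then ((pvEndB bpe st et size (pvFindB bpe st et size p) : Nat) : Int) else (p : Int),
         decide (pvFindB bpe st et size p < pvEndB bpe st et size (pvFindB bpe st et size p))) := by
  have hjle : pvFindB bpe st et size p ≤ size := pvFindB_le bpe st et size p hp
  rw [innerA_skip bpe st et mx size red (p : Int) p hp]
  by_cases hjlt : pvFindB bpe st et size p < size
  · have h := innerA_run bpe st et mx size (size - pvFindB bpe st et size p)
      (pvFindB bpe st et size p) [] red (p : Int) false rfl hjle
      (Or.inr ⟨hjlt, pvFindB_spec bpe st et size p hjlt⟩)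
    simpa using h
  · have hje : pvFindB bpe st et size p = size := by omega
    have hkeq : pvEndB bpe st et size (pvFindB bpe st et size p) = pvFindB bpe st et size p := by
      rw [pvEndB_unfold, if_neg (by omega : ¬ pvFindB bpe st et size p < size)]
    have hnil : PySem.List.pyRange ((pvFindB bpe st et size p : Nat) : Int) (size : Int) 1 = [] :=
      PySem.List.pyRange_one_eq_nil (by exact_mod_cast (by omega : size ≤ pvFindB bpe st et size p))
    rw [hnil, hkeq]
    simp [pvInnerA]

-- B-side bridge: the enumerated suffix of the live pieces, starting at p
def pvE (bpe : List (Int × Int)) (size p : Nat) : List (Int × (Int × Int)) :=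
  PySem.List.enumerate ((bpe.take size).drop p) (p : Int)

lemma pvE_cons (bpe : List (Int × Int)) (size p : Nat) (hsz : size ≤ bpe.length)
    (hp : p < size) :
    pvE bpe size p = ((p : Int), bpe.getD p (0, 0)) :: pvE bpe size (p + 1) := by
  have hplen : p < (bpe.take size).length := by simp; omega
  have hdrop : (bpe.take size).drop p = (bpe.take size)[p] :: (bpe.take size).drop (p + 1) :=
    List.drop_eq_getElem_cons hplen
  have hgp : (bpe.take size)[p] = bpe.getD p (0, 0) := by
    rw [List.getElem_take]
    exact (List.getD_eq_getElem bpe (0,0) (by omega)).symm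
  rw [pvE, hdrop, PySem.List.enumerate_cons, hgp]
  rfl

lemma pvE_nil (bpe : List (Int × Int)) (size : Nat) :
    pvE bpe size size = [] := by
  rw [pvE]
  have : (bpe.take size).drop size = [] := by
    apply List.drop_eq_nil_of_le
    simp
  rw [this, PySem.List.enumerate_nil]

-- dropping the non-matching prefix lands at pvFindB
lemma dropWhile_pvE (bpe : List (Int × Int)) (st et : Int) (size : Nat)
    (hsz : size ≤ bpe.length) :
    ∀ p, p ≤ size →
      (pvE bpe size p).dropWhile (fun q => !(pvOkB st et q))
        = pvE bpe size (pvFindB bpe st et size p) := by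
  intro p
  induction hn : size - p generalizing p with
  | zero =>
    intro hp
    have hpe : p = size := by omega
    have heq : pvFindB bpe st et size p = p := by
      rw [pvFindB_unfold, if_neg (by omega : ¬ p < size)]
    rw [heq, hpe, pvE_nil]
    simp
  | succ n ih =>
    intro hp
    have hlt : p < size := by omega
    rw [pvE_cons bpe size p hsz hlt]
    by_cases hm : ((bpe.getD p (0, 0)).1 ≥ st ∧ (bpe.getD p (0, 0)).2 ≤ et)
    · have heq : pvFindB bpe st et size p = p := by
        rw [pvFindB_unfold, if_pos hlt, if_pos hm]
      have hok : pvOkB st et ((p : Int), bpe.getD p (0, 0)) = true :=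
        decide_eq_true ⟨hm.1, hm.2⟩
      rw [List.dropWhile_cons]
      simp only [hok, Bool.not_true, if_neg (Bool.false_ne_true)]
      rw [heq, pvE_cons bpe size p hsz hlt]
    · have heq : pvFindB bpe st et size p = pvFindB bpe st et size (p + 1) := by
        rw [pvFindB_unfold, if_pos hlt, if_neg hm]
      have hok : pvOkB st et ((p : Int), bpe.getD p (0, 0)) = false := by
        simp only [pvOkB, decide_eq_false_iff_not]
        exact fun h => hm ⟨h.1, h.2⟩
      rw [List.dropWhile_cons]
      simp only [hok, Bool.not_false, if_true]
      rw [heq]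
      exact ih (p + 1) (by omega) (by omega)

-- the matching run from pvFindB reaches exactly pvEndB
lemma takeWhile_pvE (bpe : List (Int × Int)) (st et : Int) (size : Nat)
    (hsz : size ≤ bpe.length) :
    ∀ j, j ≤ size →
      ((pvE bpe size j).takeWhile (pvOkB st et)).map (fun p => p.1)
          = (List.range' j (pvEndB bpe st et size j - j)).map (fun n => (n : Int))
        ∧ ((pvE bpe size j).takeWhile (pvOkB st et)).length = pvEndB bpe st et size j - j
        ∧ (pvE bpe size j).drop (pvEndB bpe st et size j - j)
            = pvE bpe size (pvEndB bpe st et size j) := by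
  intro j
  induction hn : size - j generalizing j with
  | zero =>
    intro hj
    have hje : j = size := by omega
    have hkeq : pvEndB bpe st et size j = j := by
      rw [pvEndB_unfold, if_neg (by omega : ¬ j < size)]
    subst hje
    rw [hkeq, pvE_nil]
    simp
  | succ n ih =>
    intro hj
    have hlt : j < size := by omega
    rw [pvE_cons bpe size j hsz hlt]
    by_cases hm : ((bpe.getD j (0, 0)).1 ≥ st ∧ (bpe.getD j (0, 0)).2 ≤ et)
    · have hend : pvEndB bpe st et size j = pvEndB bpe st et size (j + 1) := by
        rw [pvEndB_unfold, if_pos hlt, if_pos hm]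
      have hkge : j + 1 ≤ pvEndB bpe st et size (j + 1) := pvEndB_ge bpe st et size (j + 1)
      have hok : pvOkB st et ((j : Int), bpe.getD j (0, 0)) = true :=
        decide_eq_true ⟨hm.1, hm.2⟩
      obtain ⟨ih1, ih2, ih3⟩ := ih (j + 1) (by omega) (by omega)
      have hd : pvEndB bpe st et size j - j = (pvEndB bpe st et size (j + 1) - (j + 1)) + 1 := by
        rw [hend]; omega
      have hrun : List.range' j (pvEndB bpe st et size j - j)
          = j :: List.range' (j + 1) (pvEndB bpe st et size (j + 1) - (j + 1)) := by
        rw [hd, List.range'_succ]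
      refine ⟨?_, ?_, ?_⟩
      · rw [List.takeWhile_cons, hok, hrun]
        simp [ih1]
      · rw [List.takeWhile_cons, hok, hd]
        simp [ih2]
      · rw [hd, List.drop_succ_cons, ih3, hend]
    · have hkeq : pvEndB bpe st et size j = j := by
        rw [pvEndB_unfold, if_pos hlt, if_neg hm]
      have hok : pvOkB st et ((j : Int), bpe.getD j (0, 0)) = false := by
        simp only [pvOkB, decide_eq_false_iff_not]
        exact fun h => hm ⟨h.1, h.2⟩
      rw [hkeq]
      refine ⟨?_, ?_, ?_⟩
      · rw [List.takeWhile_cons, hok]; simp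
      · rw [List.takeWhile_cons, hok]; simp
      · rw [Nat.sub_self, List.drop_zero, ← pvE_cons bpe size j hsz hlt]

-- the two phase structures agree: A's outer loop computes exactly B's capped runs
lemma outerAB (bpe : List (Int × Int)) (mx : Int) (size : Nat) (hsz : size ≤ bpe.length) :
    ∀ (toks : List (Int × Int)) (gs : List (List Int)) (redA : List Int) (p : Nat), p ≤ size →
      (pvOuterA bpe mx (size : Int) toks (gs, redA, (p : Int))).1
          = gs ++ (pvRunsB toks (pvE bpe size p)).map (fun r => r.take mx.toNat)
        ∧ (pvOuterA bpe mx (size : Int) toks (gs, redA, (p : Int))).2.1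
          = redA ++ (pvRunsB toks (pvE bpe size p)).flatMap (fun r => r.drop mx.toNat) := by
  intro toks
  induction toks with
  | nil => intro gs redA p hp; simp [pvOuterA, pvRunsB]
  | cons tk toks ih =>
    intro gs redA p hp
    obtain ⟨st, et⟩ := tk
    have hjle : pvFindB bpe st et size p ≤ size := pvFindB_le bpe st et size p hp
    have hkle : pvEndB bpe st et size (pvFindB bpe st et size p) ≤ size :=
      pvEndB_le bpe st et size (pvFindB bpe st et size p) hjle
    set j := pvFindB bpe st et size p with hj
    set k := pvEndB bpe st et size j with hk
    have hrunInts :=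
      (takeWhile_pvE bpe st et size hsz j hjle)
    obtain ⟨hmap, hlen, hdrop⟩ := hrunInts
    have htail : (pvE bpe size p).dropWhile (fun q => !(pvOkB st et q)) = pvE bpe size j :=
      dropWhile_pvE bpe st et size hsz p hp
    -- B's one-token step
    have hB : pvRunsB ((st, et) :: toks) (pvE bpe size p)
        = ((List.range' j (k - j)).map (fun n => (n : Int)))
            :: pvRunsB toks (pvE bpe size (if j < k then k else p)) := by
      show (let tail := (pvE bpe size p).dropWhile (fun q => !(pvOkB st et q));
            let run := tail.takeWhile (pvOkB st et);
            let rest' := if run = [] then pvE bpe size p else tail.drop run.length;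
            run.map (fun q => q.1) :: pvRunsB toks rest') = _
      simp only [htail]
      by_cases hjk : j < k
      · have hne : (pvE bpe size j).takeWhile (pvOkB st et) ≠ [] := by
          intro hnil
          rw [hnil] at hlen
          simp at hlen
          omega
        simp only [if_neg hne, hlen, hdrop, hmap, if_pos hjk]
        rw [← hk]
      · have hkj : k = j := by have := pvEndB_ge bpe st et size j; omega
        have he : (pvE bpe size j).takeWhile (pvOkB st et) = [] := by
          apply List.eq_nil_of_length_eq_zero
          omega
        simp [he, hkj]
    -- A's one-token step
    have hA : pvOuterA bpe mx (size : Int) ((st, et) :: toks) (gs, redA, (p : Int))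
        = pvOuterA bpe mx (size : Int) toks
            (gs ++ [((List.range' j (k - j)).map (fun n => (n : Int))).take mx.toNat],
             redA ++ ((List.range' j (k - j)).map (fun n => (n : Int))).drop mx.toNat,
             (((if j < k then k else p) : Nat) : Int)) := by
      show pvOuterA bpe mx (size : Int) toks _ = _
      rw [innerA_token bpe st et mx size redA p hp]
      simp only [← hj, ← hk]
      congr 2
      by_cases hjk : j < k
      · simp [hjk]
      · simp [hjk]
    rw [hA, hB]
    have hp' : (if j < k then k else p) ≤ size := by split <;> omega
    obtain ⟨ihl, ihr⟩ := ih (gs ++ [((List.range' j (k - j)).map (fun n => (n : Int))).take mx.toNat])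
      (redA ++ ((List.range' j (k - j)).map (fun n => (n : Int))).drop mx.toNat)
      (if j < k then k else p) hp'
    refine ⟨?_, ?_⟩
    · rw [ihl]; simp [List.map_cons]
    · rw [ihr]; simp [List.flatMap_cons]

-- ===== VERDICT (by name: the statement is the Claim_ definition above) =====
theorem get_bpe_groups_spec : Claim_equal_get_bpe_groups := by
  intro token_offsets bpe_offsets input_ids max_bpe_pieces _
  unfold Spec_get_bpe_groups
  simp only [get_bpe_groups, get_bpe_groups_alt]
  set sizeN : Nat := (match PySem.List.index? bpe_offsets (0, 0) with
    | some k => k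
    | none => bpe_offsets.length) with hsz
  have hszInt : (match PySem.List.index? bpe_offsets (0, 0) with
      | some k => (k : Int)
      | none => (bpe_offsets.length : Int)) = (sizeN : Int) := by
    rw [hsz]; cases PySem.List.index? bpe_offsets (0, 0) <;> rfl
  have hszle : sizeN ≤ bpe_offsets.length := by
    rw [hsz]
    cases hidx : PySem.List.index? bpe_offsets (0, 0) with
    | none => simp
    | some k =>
      obtain ⟨hk, _, _⟩ := PySem.List.getElem_of_index?_eq_some hidx
      simp; omega
  have hslice : PySem.List.slice bpe_offsets none (some (sizeN : Int)) = bpe_offsets.take sizeN :=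
    PySem.List.slice_to_natCast bpe_offsets sizeN
  have hcut : (max max_bpe_pieces 0).toNat = max_bpe_pieces.toNat := by omega
  rw [hszInt, hslice, hcut]
  have hE0 : PySem.List.enumerate (bpe_offsets.take sizeN) 0 = pvE bpe_offsets sizeN 0 := by
    rw [pvE]; simp
  rw [hE0]
  obtain ⟨h1, h2⟩ := outerAB bpe_offsets max_bpe_pieces sizeN hszle token_offsets [] [] 0
    (Nat.zero_le _)
  have h0 : ((0 : Nat) : Int) = (0 : Int) := rfl
  rw [h0] at h1 h2
  refine Prod.ext ?_ ?_
  · dsimp only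
    rw [h1]; simp
  · dsimp only
    apply List.filter_congr
    intro x _
    have hx : (pvOuterA bpe_offsets max_bpe_pieces (sizeN : Int) token_offsets ([], [], 0)).2.1
        = (pvRunsB token_offsets (pvE bpe_offsets sizeN 0)).flatMap (fun r => r.drop max_bpe_pieces.toNat) := by
      rw [h2]; simp
    rw [hx]
    simp only [List.contains_eq_mem, PySem.Set.contains_eq_listContains]
    congr 1
    simp only [decide_eq_decide]
    simp [PySem.Set.mem_ofList]
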